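-- pv_equiv track=rewrite | github.com/AlgoMathITMO/public-transport-network | ptn/preprocessing/osm.py | is_hotel_business
-- ===== SOURCE A (Python) =====
-- from typing import List, Tuple, Dict, Optional, Set
--
-- def is_any_pair_present(tags: dict, items: List[Tuple[str, str]]) -> bool:
--     return isinstance(tags, dict) \
--            and any((key, value) in items for key, value in tags.items())
--
-- def is_hotel_business(tags: dict) -> bool:
--     items = [
--         ('leisure', 'resort'),
--         ('building', 'dormitory'),
--     ]
--     items += [('tourism', val) for val in ['hotel', 'motel', 'apartment', 'hostel',
--                                            'health_complex', 'camp', 'caravan_site',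
--                                            'camp_site']]
--
--     return is_any_pair_present(tags, items)
-- ===== SOURCE B (Python) =====
-- HOTEL_PAIRS = [('leisure', 'resort'), ('building', 'dormitory')] + \
--     [('tourism', v) for v in ('hotel', 'motel', 'apartment', 'hostel',
--                               'health_complex', 'camp', 'caravan_site', 'camp_site')]
--
-- def is_hotel_business(tags: dict) -> bool:
--     if not isinstance(tags, dict):
--         return False
--     return any(tags.get(k) == v for k, v in HOTEL_PAIRS)
-- ===== Notes on version B (the rewrite author's own statement) =====
-- stated objective: idiomatic
-- what changed: Inverted the traversal: instead of scanning every tag entry and testing pair membership in the hotel-pair list, B iterates over the fixed 10-element hotel pair list and does one dict.get lookup per pair.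
import Mathlib
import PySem

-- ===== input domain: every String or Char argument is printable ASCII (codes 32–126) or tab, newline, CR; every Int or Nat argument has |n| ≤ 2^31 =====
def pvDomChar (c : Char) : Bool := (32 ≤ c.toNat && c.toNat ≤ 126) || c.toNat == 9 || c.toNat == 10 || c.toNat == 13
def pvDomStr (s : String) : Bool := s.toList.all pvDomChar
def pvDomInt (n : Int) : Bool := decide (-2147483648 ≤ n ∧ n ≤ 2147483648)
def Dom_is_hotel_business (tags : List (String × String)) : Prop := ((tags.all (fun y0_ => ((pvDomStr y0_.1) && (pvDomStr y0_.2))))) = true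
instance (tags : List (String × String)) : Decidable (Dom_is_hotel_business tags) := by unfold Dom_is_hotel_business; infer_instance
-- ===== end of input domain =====

-- B inverts the traversal (loops over the fixed hotel pair list with a dict lookup per pair,
-- instead of scanning the tag entries for membership in that list): more idiomatic, same cost.

-- ===== PORT A =====
-- helper: is_any_pair_present (tags is always a dict here, so the isinstance guard is True)
def is_any_pair_present (tags : List (String × String)) (items : List (String × String)) : Bool :=
  tags.any (fun kv => items.contains kv)

def is_hotel_business (tags : List (String × String)) : Bool :=
  is_any_pair_present tags
    ([("leisure", "resort"), ("building", "dormitory")] ++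
     (["hotel", "motel", "apartment", "hostel", "health_complex", "camp",
       "caravan_site", "camp_site"].map (fun v => ("tourism", v))))

-- ===== PORT B =====
def hotelPairs : List (String × String) :=
  [("leisure", "resort"), ("building", "dormitory")] ++
  (["hotel", "motel", "apartment", "hostel", "health_complex", "camp",
    "caravan_site", "camp_site"].map (fun v => ("tourism", v)))

def is_hotel_business_alt (tags : List (String × String)) : Bool :=
  hotelPairs.any (fun kv => (PySem.Dict.mk tags).get? kv.1 == some kv.2)

-- ===== PRECONDITION & SPEC =====
-- Pre_ excludes association lists with duplicate keys: a Python dict cannot present duplicate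
-- keys, so on such lists (which only the List encoding can express) either reading — scan all
-- pairs vs first-match lookup — is accidental.
def Pre_is_hotel_business (tags : List (String × String)) : Prop :=
  (tags.map Prod.fst).Nodup
instance (tags : List (String × String)) : Decidable (Pre_is_hotel_business tags) := by
  unfold Pre_is_hotel_business; infer_instance

def pvWitness_is_hotel_business : (List (String × String)) :=
  [("tourism", "hotel"), ("name", "Plaza")]

def Spec_is_hotel_business (tags : List (String × String)) (out : Bool) : Prop := out = is_hotel_business_alt tags
instance (tags : List (String × String)) (out : Bool) : Decidable (Spec_is_hotel_business tags out) := by unfold Spec_is_hotel_business; infer_instance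

-- ===== CLAIM (what is proved, stated in full; the proofs are below) =====
def Claim_equal_is_hotel_business : Prop := ∀ (tags : List (String × String)), Dom_is_hotel_business tags → Pre_is_hotel_business tags → Spec_is_hotel_business tags (is_hotel_business tags)

-- ===== LEMMAS AND PROOFS =====

-- Under unique keys, B's first-match lookup succeeding with v is exactly membership of (k, v).
theorem lookup_eq_mem (tags : List (String × String))
    (hnd : (tags.map Prod.fst).Nodup) (k v : String) :
    (PySem.Dict.mk tags).get? k = some v ↔ (k, v) ∈ tags := by
  have h : (PySem.Dict.mk tags).keys.Nodup := by simpa [PySem.Dict.keys] using hnd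
  exact PySem.Dict.get?_eq_some_iff_mem_items _ k v h

-- Swapping which list drives the ∃-search does not change the answer.
theorem any_swap (tags items : List (String × String))
    (hnd : (tags.map Prod.fst).Nodup) :
    tags.any (fun kv => items.contains kv)
      = items.any (fun kv => (PySem.Dict.mk tags).get? kv.1 == some kv.2) := by
  rw [Bool.eq_iff_iff]
  simp only [List.any_eq_true, List.contains_iff_exists_mem_beq, beq_iff_eq]
  constructor
  · rintro ⟨kv, hkv, y, hy, hEq⟩
    exact ⟨y, hy, (lookup_eq_mem tags hnd y.1 y.2).2 (hEq ▸ hkv)⟩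
  · rintro ⟨kv, hkv, h⟩
    exact ⟨kv, (lookup_eq_mem tags hnd kv.1 kv.2).1 (by simpa using h), kv, hkv, rfl⟩

-- ===== VERDICT (by name: the statement is the Claim_ definition above) =====
theorem is_hotel_business_spec : Claim_equal_is_hotel_business := by
  intro tags _ hpre
  unfold Spec_is_hotel_business is_hotel_business is_any_pair_present is_hotel_business_alt hotelPairs
  exact any_swap tags _ hpre
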